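-- pv_equiv track=rewrite | github.com/mvoroge/Algorithms | polibiy.py | getCryptoChar
-- ===== SOURCE A (Python) =====
-- matrix = [['a', 'b', 'c', 'd', 'e'],
--           ['f', 'g', 'h', 'i', 'k'],
--           ['l', 'm', 'n', 'o', 'p'],
--           ['q', 'r', 's', 't', 'u'],
--           ['v', 'w', 'x', 'y', 'z'],
--           ['!', '?', '*', '<', '>'],
--           ]
--
-- matrixHeight = len(matrix)
--
-- matrixWidth = len(matrix[0])
--
-- def getCryptoChar(char, cipher=True):
--     for indexHeight in range(0, matrixHeight):
--         for indexWidth in range(0, matrixWidth):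
--             if char == matrix[indexHeight][indexWidth]:
--                 if (cipher == True):
--                     return matrix[(indexHeight + 1) % matrixHeight][indexWidth]
--                 else:
--                     return matrix[(indexHeight - 1) % matrixHeight][indexWidth]
--     return char  # return input character, if not found
-- ===== SOURCE B (Python) =====
-- # Flat alphabet: the matrix rows concatenated in row-major order.  Moving one
-- # row down/up in the grid is just a shift of +/- row-width positions modulo the
-- # alphabet length, so no 2-D structure (and no per-cell search) is needed.
-- _ORDER = list("abcdefghiklmnopqrstuvwxyz!?*<>")
-- _W = 5  # width of one matrix row
--
--
-- def getCryptoChar(char, cipher=True):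
--     if char not in _ORDER:
--         return char
--     step = _W if cipher == True else -_W
--     return _ORDER[(_ORDER.index(char) + step) % len(_ORDER)]
-- ===== Notes on version B (the rewrite author's own statement) =====
-- stated objective: alternative
-- what changed: Replaces the 2-D row/column grid scan by a flat row-major alphabet list: the (row+/-1) mod height rule becomes a +/- row-width shift of the flat index modulo the alphabet length, computed arithmetically from one index() call.
import Mathlib
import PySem

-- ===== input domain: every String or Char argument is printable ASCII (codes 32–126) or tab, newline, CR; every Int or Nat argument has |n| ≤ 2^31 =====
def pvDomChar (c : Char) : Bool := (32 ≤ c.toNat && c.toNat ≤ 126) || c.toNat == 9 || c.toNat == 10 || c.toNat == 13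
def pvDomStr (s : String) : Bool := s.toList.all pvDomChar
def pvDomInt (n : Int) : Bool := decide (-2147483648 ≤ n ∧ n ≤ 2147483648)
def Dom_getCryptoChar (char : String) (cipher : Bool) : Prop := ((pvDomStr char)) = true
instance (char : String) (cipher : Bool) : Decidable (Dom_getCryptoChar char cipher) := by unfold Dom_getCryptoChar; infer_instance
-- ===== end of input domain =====

-- B drops the 2-D grid entirely: a flat row-major alphabet list where moving one
-- row down/up is a +/- row-width shift of the flat index modulo 30 (objective: alternative).

-- ===== PORT A =====
def pvMatrix : List (List String) :=
  [["a", "b", "c", "d", "e"],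
   ["f", "g", "h", "i", "k"],
   ["l", "m", "n", "o", "p"],
   ["q", "r", "s", "t", "u"],
   ["v", "w", "x", "y", "z"],
   ["!", "?", "*", "<", ">"]]

def pvMatrixHeight : Int := (pvMatrix.length : Int)

def pvMatrixWidth : Int := ((PySem.List.pyGetD pvMatrix 0 []).length : Int)

-- inner 'for indexWidth in range(0, matrixWidth)' with its early returns
def pvInnerA (char : String) (cipher : Bool) (indexHeight : Int) : List Int → Option String
  | [] => none
  | indexWidth :: rest =>
    if char == PySem.List.pyGetD (PySem.List.pyGetD pvMatrix indexHeight []) indexWidth "" then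
      if cipher == true then
        some (PySem.List.pyGetD (PySem.List.pyGetD pvMatrix (PySem.Int.mod (indexHeight + 1) pvMatrixHeight) []) indexWidth "")
      else
        some (PySem.List.pyGetD (PySem.List.pyGetD pvMatrix (PySem.Int.mod (indexHeight - 1) pvMatrixHeight) []) indexWidth "")
    else pvInnerA char cipher indexHeight rest

-- outer 'for indexHeight in range(0, matrixHeight)'
def pvOuterA (char : String) (cipher : Bool) : List Int → String
  | [] => char  -- return input character, if not found
  | indexHeight :: rest =>
    match pvInnerA char cipher indexHeight (PySem.List.pyRange 0 pvMatrixWidth 1) with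
    | some r => r
    | none => pvOuterA char cipher rest

def getCryptoChar (char : String) (cipher : Bool) : String :=
  pvOuterA char cipher (PySem.List.pyRange 0 pvMatrixHeight 1)

-- ===== PORT B =====
-- _ORDER = list("abcdefghiklmnopqrstuvwxyz!?*<>"), the rows in row-major order
def pvOrder : List String :=
  ["a", "b", "c", "d", "e", "f", "g", "h", "i", "k",
   "l", "m", "n", "o", "p", "q", "r", "s", "t", "u",
   "v", "w", "x", "y", "z", "!", "?", "*", "<", ">"]

def pvW : Int := 5  -- width of one matrix row

def getCryptoChar_alt (char : String) (cipher : Bool) : String :=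
  if !(pvOrder.contains char) then char
  else
    let step : Int := if cipher == true then pvW else -pvW
    PySem.List.pyGetD pvOrder
      (PySem.Int.mod ((((PySem.List.index? pvOrder char).getD 0 : Nat) : Int) + step)
        (pvOrder.length : Int)) ""

-- ===== PRECONDITION & SPEC =====
def Spec_getCryptoChar (char : String) (cipher : Bool) (out : String) : Prop := out = getCryptoChar_alt char cipher
instance (char : String) (cipher : Bool) (out : String) : Decidable (Spec_getCryptoChar char cipher out) := by unfold Spec_getCryptoChar; infer_instance

-- ===== CLAIM (what is proved, stated in full; the proofs are below) =====
def Claim_equal_getCryptoChar : Prop := ∀ (char : String) (cipher : Bool), Dom_getCryptoChar char cipher → Spec_getCryptoChar char cipher (getCryptoChar char cipher)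

-- ===== LEMMAS AND PROOFS =====

set_option maxHeartbeats 4000000 in
theorem pvMain (char : String) (cipher : Bool) :
    getCryptoChar char cipher = getCryptoChar_alt char cipher := by
  by_cases h0 : char = "a"
  · subst h0; cases cipher <;> decide
  by_cases h1 : char = "b"
  · subst h1; cases cipher <;> decide
  by_cases h2 : char = "c"
  · subst h2; cases cipher <;> decide
  by_cases h3 : char = "d"
  · subst h3; cases cipher <;> decide
  by_cases h4 : char = "e"
  · subst h4; cases cipher <;> decide
  by_cases h5 : char = "f"
  · subst h5; cases cipher <;> decide
  by_cases h6 : char = "g"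
  · subst h6; cases cipher <;> decide
  by_cases h7 : char = "h"
  · subst h7; cases cipher <;> decide
  by_cases h8 : char = "i"
  · subst h8; cases cipher <;> decide
  by_cases h9 : char = "k"
  · subst h9; cases cipher <;> decide
  by_cases h10 : char = "l"
  · subst h10; cases cipher <;> decide
  by_cases h11 : char = "m"
  · subst h11; cases cipher <;> decide
  by_cases h12 : char = "n"
  · subst h12; cases cipher <;> decide
  by_cases h13 : char = "o"
  · subst h13; cases cipher <;> decide
  by_cases h14 : char = "p"
  · subst h14; cases cipher <;> decide
  by_cases h15 : char = "q"
  · subst h15; cases cipher <;> decide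
  by_cases h16 : char = "r"
  · subst h16; cases cipher <;> decide
  by_cases h17 : char = "s"
  · subst h17; cases cipher <;> decide
  by_cases h18 : char = "t"
  · subst h18; cases cipher <;> decide
  by_cases h19 : char = "u"
  · subst h19; cases cipher <;> decide
  by_cases h20 : char = "v"
  · subst h20; cases cipher <;> decide
  by_cases h21 : char = "w"
  · subst h21; cases cipher <;> decide
  by_cases h22 : char = "x"
  · subst h22; cases cipher <;> decide
  by_cases h23 : char = "y"
  · subst h23; cases cipher <;> decide
  by_cases h24 : char = "z"
  · subst h24; cases cipher <;> decide
  by_cases h25 : char = "!"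
  · subst h25; cases cipher <;> decide
  by_cases h26 : char = "?"
  · subst h26; cases cipher <;> decide
  by_cases h27 : char = "*"
  · subst h27; cases cipher <;> decide
  by_cases h28 : char = "<"
  · subst h28; cases cipher <;> decide
  by_cases h29 : char = ">"
  · subst h29; cases cipher <;> decide
  -- char occurs nowhere: both sides return char unchanged
  have hmem : char ∉ pvOrder := by
    simp [pvOrder, h0, h1, h2, h3, h4, h5, h6, h7, h8, h9, h10, h11, h12, h13, h14,
      h15, h16, h17, h18, h19, h20, h21, h22, h23, h24, h25, h26, h27, h28, h29]
  have hB : getCryptoChar_alt char cipher = char := by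
    simp [getCryptoChar_alt, hmem]
  rw [hB]
  have hr6 : PySem.List.pyRange 0 pvMatrixHeight 1 = [0, 1, 2, 3, 4, 5] := by decide
  have hr5 : PySem.List.pyRange 0 pvMatrixWidth 1 = [0, 1, 2, 3, 4] := by decide
  have hma : Int.fmod (-1) 6 = 5 := by decide
  have hm0 : Int.fmod 0 6 = 0 := by decide
  have hm1 : Int.fmod 1 6 = 1 := by decide
  have hm2 : Int.fmod 2 6 = 2 := by decide
  have hm3 : Int.fmod 3 6 = 3 := by decide
  have hm4 : Int.fmod 4 6 = 4 := by decide
  have hm5 : Int.fmod 5 6 = 5 := by decide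
  have hm6 : Int.fmod 6 6 = 0 := by decide
  simp only [getCryptoChar, hr6, hr5, pvOuterA, pvInnerA]
  norm_num [pvMatrix, pvMatrixHeight, hma, hm0, hm1, hm2, hm3, hm4, hm5, hm6,
    PySem.List.pyGetD_ofNat', PySem.Int.mod, h0, h1, h2, h3, h4, h5, h6, h7,
    h8, h9, h10, h11, h12, h13, h14, h15, h16, h17, h18, h19, h20, h21, h22, h23, h24, h25,
    h26, h27, h28, h29]

-- ===== VERDICT (by name: the statement is the Claim_ definition above) =====
theorem getCryptoChar_spec : Claim_equal_getCryptoChar := by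
  intro char cipher _
  unfold Spec_getCryptoChar
  exact pvMain char cipher
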